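-- pv_equiv track=rewrite | github.com/crimtech/crimtech-comp-s21 | python/rm_smallest.py | rm_smallest
-- ===== SOURCE A (Python) =====
-- def rm_smallest(d):
--     # Your code here!
--     keys = list(d.keys())
--     if len(keys) == 0:
--         return d
--     cur_min = d[keys[0]]
--     cur_key = keys[0]
--     for k in d.keys():
--         if cur_min > d[k]:
--             cur_key = k
--             cur_min = d[k]
--     del d[cur_key]
--     return d
-- ===== SOURCE B (Python) =====
-- def rm_smallest(d):
--     if not d:
--         return d
--     key = sorted(d.items(), key=lambda kv: kv[1])[0][0]
--     del d[key]
--     return d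
-- ===== Notes on version B (the rewrite author's own statement) =====
-- stated objective: alternative
-- what changed: Replaces the explicit first-minimum scan over d.keys() with a stable sort of d.items() by value, taking the first key of the sorted view (stability preserves A's first-minimum tie-breaking).
import Mathlib
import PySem

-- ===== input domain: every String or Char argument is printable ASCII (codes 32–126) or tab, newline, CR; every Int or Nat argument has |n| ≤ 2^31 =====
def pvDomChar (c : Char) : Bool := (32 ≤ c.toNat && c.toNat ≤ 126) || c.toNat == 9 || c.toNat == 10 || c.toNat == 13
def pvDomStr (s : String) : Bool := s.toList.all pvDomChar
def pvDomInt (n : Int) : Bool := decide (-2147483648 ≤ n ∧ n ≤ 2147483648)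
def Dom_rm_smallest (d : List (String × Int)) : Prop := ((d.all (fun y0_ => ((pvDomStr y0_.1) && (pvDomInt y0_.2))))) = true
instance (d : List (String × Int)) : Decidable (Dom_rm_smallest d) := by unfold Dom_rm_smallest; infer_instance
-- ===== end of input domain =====

-- B removes the same entry via a stable sort of the items by value instead of A's explicit
-- first-minimum scan; both Pythons mutate d in place identically, the equivalence proved is
-- about the return value.

-- ===== PORT A =====
-- d[k] (first match; in A the key is always present, the default is unreachable)
def pvGetA (d : List (String × Int)) (k : String) : Int :=
  match d.find? (fun p => p.1 == k) with
  | some p => p.2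
  | none => 0

def rm_smallest (d : List (String × Int)) : List (String × Int) :=
  let keys := d.map Prod.fst
  match keys with
  | [] => d
  | k0 :: _ =>
    let st := keys.foldl
      (fun (s : String × Int) k => if s.2 > pvGetA d k then (k, pvGetA d k) else s)
      (k0, pvGetA d k0)
    d.eraseP (fun p => p.1 == st.1)

-- ===== PORT B =====
def rm_smallest_alt (d : List (String × Int)) : List (String × Int) :=
  if d.isEmpty then d
  else
    match PySem.List.sorted d (fun kv => kv.2) false with
    | [] => d   -- unreachable: sorted of a nonempty list is nonempty
    | m :: _ => d.eraseP (fun p => p.1 == m.1)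

-- ===== PRECONDITION & SPEC =====
-- Pre_ excludes association lists with duplicate keys: those do not represent any Python dict
-- (rm_smallest's argument is a dict, whose keys are unique).
def Pre_rm_smallest (d : List (String × Int)) : Prop := (d.map Prod.fst).Nodup
instance (d : List (String × Int)) : Decidable (Pre_rm_smallest d) := by unfold Pre_rm_smallest; infer_instance
def pvWitness_rm_smallest : (List (String × Int)) := [("a", 1), ("b", 0)]

def Spec_rm_smallest (d : List (String × Int)) (out : List (String × Int)) : Prop := out = rm_smallest_alt d
instance (d : List (String × Int)) (out : List (String × Int)) : Decidable (Spec_rm_smallest d out) := by unfold Spec_rm_smallest; infer_instance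

-- ===== CLAIM (what is proved, stated in full; the proofs are below) =====
def Claim_equal_rm_smallest : Prop := ∀ (d : List (String × Int)), Dom_rm_smallest d → Pre_rm_smallest d → Spec_rm_smallest d (rm_smallest d)

-- ===== LEMMAS AND PROOFS =====

-- the common "first strict minimum" step
def pvStep (s q : String × Int) : String × Int := if s.2 > q.2 then q else s

lemma find?_fst_of_nodup (d : List (String × Int)) (h : (d.map Prod.fst).Nodup)
    (q : String × Int) (hq : q ∈ d) : d.find? (fun p => p.1 == q.1) = some q := by
  induction d with
  | nil => cases hq
  | cons p t ih =>
    simp only [List.map_cons, List.nodup_cons] at h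
    rcases List.mem_cons.1 hq with rfl | hq'
    · simp [List.find?]
    · have hne : (p.1 == q.1) = false := beq_eq_false_iff_ne.mpr
        (fun he => h.1 (he ▸ List.mem_map_of_mem hq'))
      simp [List.find?, hne, ih h.2 hq']

lemma getA_of_mem (d : List (String × Int)) (h : (d.map Prod.fst).Nodup)
    (q : String × Int) (hq : q ∈ d) : pvGetA d q.1 = q.2 := by
  simp [pvGetA, find?_fst_of_nodup d h q hq]

lemma foldl_step_congr (d : List (String × Int)) (h : (d.map Prod.fst).Nodup) :
    ∀ (l : List (String × Int)) (s : String × Int), (∀ q ∈ l, q ∈ d) →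
      l.foldl (fun s q => if s.2 > pvGetA d q.1 then (q.1, pvGetA d q.1) else s) s
        = l.foldl pvStep s := by
  intro l
  induction l with
  | nil => intro s _; rfl
  | cons q t ih =>
    intro s hmem
    have hq : q ∈ d := hmem q (List.mem_cons_self)
    have ht : ∀ r ∈ t, r ∈ d := fun r hr => hmem r (List.mem_cons_of_mem _ hr)
    simp only [List.foldl_cons, getA_of_mem d h q hq, pvStep, ih _ ht]

-- head of the insertion-sort fold is the first strict minimum
lemma foldl_insertBy_head :
    ∀ (l : List (String × Int)) (c : String × Int) (cs : List (String × Int)),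
      ∃ cs', l.foldl (fun acc x =>
          PySem.List.insertBy (fun a b => decide (a.2 < b.2)) x acc) (c :: cs)
        = (l.foldl pvStep c) :: cs' := by
  intro l
  induction l with
  | nil => intro c cs; exact ⟨cs, rfl⟩
  | cons x t ih =>
    intro c cs
    by_cases hx : x.2 < c.2
    · have : PySem.List.insertBy (fun a b => decide (a.2 < b.2)) x (c :: cs)
          = x :: c :: cs := by simp [PySem.List.insertBy, hx]
      rw [List.foldl_cons, this]
      obtain ⟨cs', h'⟩ := ih x (c :: cs)
      exact ⟨cs', by rw [h']; simp [pvStep, hx]⟩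
    · have : PySem.List.insertBy (fun a b => decide (a.2 < b.2)) x (c :: cs)
          = c :: PySem.List.insertBy (fun a b => decide (a.2 < b.2)) x cs := by
        simp [PySem.List.insertBy, hx]
      rw [List.foldl_cons, this]
      obtain ⟨cs', h'⟩ := ih c _
      exact ⟨cs', by rw [h']; simp [pvStep, show ¬ c.2 > x.2 from hx]⟩

lemma sorted_head (p : String × Int) (t : List (String × Int)) :
    ∃ cs', PySem.List.sorted (p :: t) (fun kv => kv.2) false = (t.foldl pvStep p) :: cs' := by
  rw [PySem.List.sorted_eq_foldl_insertBy]
  simpa [PySem.List.insertBy] using foldl_insertBy_head t p []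

-- ===== VERDICT (by name: the statement is the Claim_ definition above) =====
theorem rm_smallest_spec : Claim_equal_rm_smallest := by
  intro d _ hpre
  unfold Spec_rm_smallest
  cases d with
  | nil => rfl
  | cons p t =>
    obtain ⟨cs', hs⟩ := sorted_head p t
    have hp : pvGetA (p :: t) p.1 = p.2 := getA_of_mem _ hpre p List.mem_cons_self
    have key_eq : (((p :: t).map Prod.fst).foldl
        (fun (s : String × Int) k => if s.2 > pvGetA (p :: t) k then (k, pvGetA (p :: t) k) else s)
        (p.1, pvGetA (p :: t) p.1)) = t.foldl pvStep p := by
      rw [List.foldl_map, foldl_step_congr (p :: t) hpre (p :: t) _ (fun q h => h), hp]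
      have hpe : ((p.1, p.2) : String × Int) = p := rfl
      rw [hpe, List.foldl_cons]
      simp [pvStep]
    simp only [List.map_cons] at key_eq
    unfold rm_smallest rm_smallest_alt
    simp only [List.map_cons, List.isEmpty_cons, Bool.false_eq_true, if_false, hs, key_eq]
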